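-- pv_equiv track=rewrite | github.com/KKosukeee/CodingQuestions | LeetCode/848_shifting_letters.py | two_pass
-- ===== SOURCE A (Python) =====
-- def two_pass(S, shifts):
--     """
--     Two-pass solution that runs in O(N) in time and space
--
--     :type S: str
--     :type shifts: List[int]
--     :rtype: str
--     """
--     prefix = [shifts[-1]]
--     for shift in reversed(shifts[:-1]):
--         prefix.append(prefix[-1] + shift)
--
--     S = list(S)
--     for i in range(len(prefix)):
--         j = len(prefix) - (i + 1)
--         S[i] = chr((ord(S[i]) + prefix[j] - ord('a')) % 26 + ord('a'))
--     return ''.join(S)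
-- ===== SOURCE B (Python) =====
-- def two_pass(S, shifts):
--     """Single backward pass: maintain the running suffix sum instead of building a prefix array."""
--     chars = list(S)
--     total = 0
--     for i in range(len(shifts) - 1, -1, -1):
--         total += shifts[i]
--         chars[i] = chr((ord(chars[i]) + total - ord('a')) % 26 + ord('a'))
--     return ''.join(chars)
-- ===== Notes on version B (the rewrite author's own statement) =====
-- stated objective: simpler
-- what changed: B fuses A's two passes (building a reversed prefix-sum array, then indexing back into it) into a single right-to-left sweep that maintains the suffix sum in a running accumulator, so no auxiliary list is built.
-- crash fix: On empty shifts A raises IndexError reading shifts[-1]; B's loop body never runs and it returns S unchanged. — e.g. on two_pass("ab", []): A raises IndexError, B returns "ab"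
import Mathlib
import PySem

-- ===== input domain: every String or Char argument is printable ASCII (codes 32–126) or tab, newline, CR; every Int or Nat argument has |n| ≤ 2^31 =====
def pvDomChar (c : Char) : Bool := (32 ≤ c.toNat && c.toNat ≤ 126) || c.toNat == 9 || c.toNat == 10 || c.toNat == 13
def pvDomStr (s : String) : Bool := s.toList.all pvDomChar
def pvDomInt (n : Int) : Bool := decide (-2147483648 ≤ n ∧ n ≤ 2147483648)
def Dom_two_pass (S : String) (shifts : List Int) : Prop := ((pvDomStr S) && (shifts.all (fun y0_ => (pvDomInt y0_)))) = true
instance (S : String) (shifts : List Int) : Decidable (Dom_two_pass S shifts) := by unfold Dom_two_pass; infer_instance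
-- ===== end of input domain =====

-- B fuses A's prefix-array build and its application loop into one right-to-left sweep with a
-- running suffix-sum accumulator (objective: simpler — no auxiliary list is materialised).

-- chr((ord(c) + p - ord('a')) % 26 + ord('a')) — identical subexpression of both Pythons
def pvShiftChar (c : Char) (p : Int) : Char :=
  Char.ofNat ((PySem.Int.mod ((c.toNat : Int) + p - 97) 26 + 97).toNat)

-- ===== PORT A =====
-- prefix = [shifts[-1]]; for shift in reversed(shifts[:-1]): prefix.append(prefix[-1] + shift)
-- then for i in range(len(prefix)): j = len(prefix)-(i+1); S[i] = chr(... prefix[j] ...)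
def two_pass (S : String) (shifts : List Int) : String :=
  let pre := ((PySem.List.slice shifts none (some (-1))).reverse).foldl
      (fun p shift => p ++ [PySem.List.pyGetD p (-1) 0 + shift])
      [PySem.List.pyGetD shifts (-1) 0]
  let cs := S.toList
  let cs2 := (PySem.List.pyRange 0 (PySem.List.len pre) 1).foldl
      (fun css i =>
        let j := PySem.List.len pre - (i + 1)
        PySem.List.pySetD css i
          (pvShiftChar (PySem.List.pyGetD css i ' ') (PySem.List.pyGetD pre j 0))) cs
  String.ofList cs2

-- ===== PORT B =====
-- total = 0; for i in range(len(shifts)-1, -1, -1): total += shifts[i]; chars[i] = chr(...)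
def two_pass_alt (S : String) (shifts : List Int) : String :=
  let st := (PySem.List.pyRange (PySem.List.len shifts - 1) (-1) (-1)).foldl
      (fun (st : List Char × Int) i =>
        let total := st.2 + PySem.List.pyGetD shifts i 0
        (PySem.List.pySetD st.1 i (pvShiftChar (PySem.List.pyGetD st.1 i ' ') total), total))
      (S.toList, 0)
  String.ofList st.1

-- ===== PRECONDITION & SPEC =====
-- Pre_ excludes exactly the inputs where Python A raises IndexError: shifts == [] (A reads
-- shifts[-1]) and len(shifts) > len(S) (A's application loop indexes S past its end).
def Pre_two_pass (S : String) (shifts : List Int) : Prop :=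
  shifts ≠ [] ∧ shifts.length ≤ S.toList.length
instance (S : String) (shifts : List Int) : Decidable (Pre_two_pass S shifts) := by
  unfold Pre_two_pass; infer_instance

def pvWitness_two_pass : String × List Int := ("abcd", [3, 5, 9])

-- A raises IndexError on empty shifts (it reads shifts[-1]); B's loop is empty there and it returns S unchanged.
def Raises_two_pass (S : String) (shifts : List Int) : Prop := shifts = []
instance (S : String) (shifts : List Int) : Decidable (Raises_two_pass S shifts) := by
  unfold Raises_two_pass; infer_instance
def pvRaiseWitness_two_pass : String × List Int := ("ab", [])
def pvRaiseWitnessOut_two_pass : String := "ab"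

def Spec_two_pass (S : String) (shifts : List Int) (out : String) : Prop := out = two_pass_alt S shifts
instance (S : String) (shifts : List Int) (out : String) : Decidable (Spec_two_pass S shifts out) := by unfold Spec_two_pass; infer_instance

-- ===== CLAIM (what is proved, stated in full; the proofs are below) =====
def Claim_equal_two_pass : Prop := ∀ (S : String) (shifts : List Int), Dom_two_pass S shifts → Pre_two_pass S shifts → Spec_two_pass S shifts (two_pass S shifts)

def Claim_raises_two_pass : Prop :=
  (∀ (S : String) (shifts : List Int), Dom_two_pass S shifts → Raises_two_pass S shifts → ¬ Pre_two_pass S shifts) ∧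
  (Dom_two_pass (pvRaiseWitness_two_pass.1) (pvRaiseWitness_two_pass.2) ∧
   Raises_two_pass (pvRaiseWitness_two_pass.1) (pvRaiseWitness_two_pass.2) ∧
   two_pass_alt (pvRaiseWitness_two_pass.1) (pvRaiseWitness_two_pass.2) = pvRaiseWitnessOut_two_pass)

-- ===== LEMMAS AND PROOFS =====

-- the common target both loops reach: position i < len(shifts) shifted by the suffix sum of shifts
def pvApply (shifts : List Int) (cs : List Char) : List Char :=
  cs.mapIdx (fun i c => if i < shifts.length then pvShiftChar c ((shifts.drop i).sum) else c)

theorem pvFoldA (L acc : List Int) (a : Int) :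
    L.foldl (fun p s => p ++ [PySem.List.pyGetD p (-1) 0 + s]) (acc ++ [a])
      = acc ++ List.scanl (· + ·) a L := by
  induction L generalizing acc a with
  | nil => simp
  | cons s L ih =>
      rw [List.scanl_cons]
      simp only [List.foldl_cons]
      rw [PySem.List.pyGetD_neg_one_append_singleton]
      have := ih (acc ++ [a]) (a + s)
      simpa using this

theorem pvScanlGet (L : List Int) (a : Int) (k : Nat) (hk : k ≤ L.length) :
    (List.scanl (· + ·) a L).getD k 0 = a + (L.take k).sum := by
  induction L generalizing a k with
  | nil => simp_all
  | cons s L ih =>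
      cases k with
      | zero => simp
      | succ k =>
          rw [List.scanl_cons]
          simp only [List.getD_cons_succ, List.take_succ_cons, List.sum_cons]
          rw [ih (a + s) k (by simpa using hk)]
          ring

theorem pvDropSum (l : List Int) (h : l ≠ []) (j : Nat) (hj : j ≤ l.length - 1) :
    (l.drop j).sum = (l.dropLast.drop j).sum + l.getLast h := by
  conv_lhs => rw [← List.dropLast_concat_getLast h]
  rw [List.drop_append_of_le_length (by rw [List.length_dropLast]; omega)]
  simp

theorem pvPrefixChar (shifts : List Int) (h : shifts ≠ []) (k : Nat) (hk : k < shifts.length) :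
    (List.scanl (· + ·) (shifts.getLast h) shifts.dropLast.reverse).getD k 0
      = (shifts.drop (shifts.length - 1 - k)).sum := by
  have hlen : shifts.dropLast.length = shifts.length - 1 := List.length_dropLast
  have hk' : k ≤ shifts.dropLast.reverse.length := by
    rw [List.length_reverse, hlen]; omega
  rw [pvScanlGet _ _ _ hk', List.take_reverse,
      pvDropSum shifts h _ (by omega), List.sum_reverse]
  have hidx : shifts.dropLast.length - k = shifts.length - 1 - k := by rw [hlen]
  rw [hidx]
  ring

-- setting index m from the original character extends the transformed prefix by one
theorem pvSetStep (f : Nat → Char → Char) (cs : List Char) (m : Nat) (hm : m < cs.length) :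
    (cs.mapIdx (fun i c => if i < m then f i c else c)).set m
        (f m ((cs.mapIdx (fun i c => if i < m then f i c else c)).getD m ' '))
      = cs.mapIdx (fun i c => if i < m + 1 then f i c else c) := by
  have hgd : (cs.mapIdx (fun i c => if i < m then f i c else c)).getD m ' ' = cs[m] := by
    rw [List.getD_eq_getElem _ _ (by simpa using hm)]
    simp [List.getElem_mapIdx]
  apply List.ext_getElem (by simp)
  intro i h1 h2
  rw [List.getElem_set]
  simp only [hgd]
  have h1' : i < cs.length := by simpa using h2
  by_cases him : i = m
  · subst him
    simp [List.getElem_mapIdx]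
  · have hiff : (i ≤ m) ↔ (i < m) := by omega
    simp [List.getElem_mapIdx, Ne.symm him, hiff]

-- A's application loop: indices 0..m-1 left to right, each set once from the original char
theorem pvLoopA (q : Int) (pre : List Int) (cs : List Char) (m : Nat) (hm : m ≤ cs.length) :
    (PySem.List.pyRange 0 (m : Int) 1).foldl
        (fun css i => PySem.List.pySetD css i
            (pvShiftChar (PySem.List.pyGetD css i ' ') (PySem.List.pyGetD pre (q - (i + 1)) 0))) cs
      = cs.mapIdx (fun i c =>
          if i < m then pvShiftChar c (PySem.List.pyGetD pre (q - ((i : Int) + 1)) 0) else c) := by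
  induction m with
  | zero =>
      rw [PySem.List.pyRange_one_eq_nil (by omega)]
      simp only [List.foldl_nil]
      apply List.ext_getElem (by simp)
      intro i h1 h2
      simp
  | succ m ih =>
      have hco : ((m + 1 : Nat) : Int) = (m : Int) + 1 := by push_cast; ring
      rw [hco, PySem.List.pyRange_one_succ_right (by omega), List.foldl_append]
      rw [ih (by omega)]
      simp only [List.foldl_cons, List.foldl_nil]
      have hmlt : m < cs.length := by omega
      rw [PySem.List.pySetD_natCast, PySem.List.pyGetD_natCast]
      exact pvSetStep (fun i c => pvShiftChar c (PySem.List.pyGetD pre (q - ((i : Int) + 1)) 0)) cs m hmlt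

-- B's backward sweep with running total
theorem pvLoopB (shifts : List Int) (m : Nat) (hm : m ≤ shifts.length) :
    ∀ (cs : List Char) (t : Int), m ≤ cs.length →
    (PySem.List.pyRange ((m : Int) - 1) (-1) (-1)).foldl
        (fun (st : List Char × Int) i =>
          (PySem.List.pySetD st.1 i
              (pvShiftChar (PySem.List.pyGetD st.1 i ' ') (st.2 + PySem.List.pyGetD shifts i 0)),
           st.2 + PySem.List.pyGetD shifts i 0)) (cs, t)
      = (cs.mapIdx (fun i c =>
            if i < m then pvShiftChar c (t + (((shifts.take m).drop i).sum)) else c),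
         t + (shifts.take m).sum) := by
  induction m with
  | zero =>
      intro cs t _
      rw [PySem.List.pyRange_neg_one_eq_nil (by omega)]
      simp only [List.foldl_nil, Prod.mk.injEq]
      refine ⟨?_, by simp⟩
      apply List.ext_getElem (by simp)
      intro i h1 h2; simp
  | succ m ih =>
      intro cs t hcs
      have hco : ((m + 1 : Nat) : Int) - 1 = (m : Int) := by push_cast; ring
      have hmlt : m < shifts.length := by omega
      have hmc : m < cs.length := by omega
      rw [hco, PySem.List.pyRange_neg_one_cons (by omega), List.foldl_cons]
      rw [PySem.List.pySetD_natCast, PySem.List.pyGetD_natCast, PySem.List.pyGetD_natCast]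
      rw [List.getD_eq_getElem shifts 0 hmlt, List.getD_eq_getElem cs ' ' hmc]
      rw [ih (by omega) _ _ (by simp; omega)]
      have htake : shifts.take (m + 1) = shifts.take m ++ [shifts[m]] := by
        rw [List.take_add_one]
        simp [List.getElem?_eq_getElem hmlt]
      simp only [Prod.mk.injEq]
      refine ⟨?_, ?_⟩
      · apply List.ext_getElem (by simp)
        intro i h1 h2
        have h2' : i < cs.length := by simpa using h2
        simp only [List.getElem_mapIdx, List.getElem_set]
        by_cases him : i = m
        · subst him
          have hd : (shifts.take (i + 1)).drop i = [shifts[i]] := by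
            rw [htake, List.drop_append_of_le_length (by rw [List.length_take]; omega)]
            have : (shifts.take i).drop i = [] :=
              List.drop_eq_nil_of_le (by rw [List.length_take]; omega)
            simp [this]
          simp [hd]
        · by_cases hlt : i < m
          · have hd2 : (shifts.take (m + 1)).drop i
                = (shifts.take m).drop i ++ [shifts[m]] := by
              rw [htake, List.drop_append_of_le_length (by simp; omega)]
            simp only [if_pos hlt, if_pos (by omega : i < m + 1), if_neg (by omega : ¬ m = i), hd2]
            simp
            congr 1
            ring
          · simp [Ne.symm him, hlt, show ¬ i ≤ m by omega]
      · rw [htake, List.sum_append]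
        simp
        ring

theorem pvB_eq (S : String) (shifts : List Int) (hlen : shifts.length ≤ S.toList.length) :
    two_pass_alt S shifts = String.ofList (pvApply shifts S.toList) := by
  unfold two_pass_alt
  show String.ofList
      ((PySem.List.pyRange ((shifts.length : Int) - 1) (-1) (-1)).foldl
        (fun (st : List Char × Int) i =>
          (PySem.List.pySetD st.1 i
              (pvShiftChar (PySem.List.pyGetD st.1 i ' ') (st.2 + PySem.List.pyGetD shifts i 0)),
           st.2 + PySem.List.pyGetD shifts i 0)) (S.toList, 0)).1
    = _
  rw [pvLoopB shifts shifts.length le_rfl S.toList 0 hlen]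
  unfold pvApply
  simp [List.take_length]

theorem pvA_eq (S : String) (shifts : List Int) (hne : shifts ≠ [])
    (hlen : shifts.length ≤ S.toList.length) :
    two_pass S shifts = String.ofList (pvApply shifts S.toList) := by
  have hn1 : 0 < shifts.length := List.length_pos_of_ne_nil hne
  unfold two_pass
  simp only [PySem.List.pyGetD_neg_one shifts 0 hne, PySem.List.slice_to_neg_one]
  have e3 : shifts.dropLast.reverse.foldl
      (fun p s => p ++ [PySem.List.pyGetD p (-1) 0 + s]) [shifts.getLast hne]
      = List.scanl (· + ·) (shifts.getLast hne) shifts.dropLast.reverse := by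
    simpa using pvFoldA shifts.dropLast.reverse [] (shifts.getLast hne)
  rw [e3]
  have hlenP : PySem.List.len (List.scanl (· + ·) (shifts.getLast hne) shifts.dropLast.reverse)
      = ((shifts.length : Nat) : Int) := by
    simp [PySem.List.len_eq]
    omega
  rw [hlenP]
  rw [pvLoopA ((shifts.length : Nat) : Int)
      (List.scanl (· + ·) (shifts.getLast hne) shifts.dropLast.reverse) S.toList
      shifts.length hlen]
  unfold pvApply
  congr 1
  apply List.ext_getElem (by simp)
  intro i h1 h2
  have h2' : i < S.toList.length := by simpa using h2
  simp only [List.getElem_mapIdx]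
  by_cases hin : i < shifts.length
  · simp only [if_pos hin]
    congr 1
    have hc2 : ((shifts.length : Nat) : Int) - (((i : Nat) : Int) + 1)
        = (((shifts.length - 1 - i : Nat)) : Int) := by omega
    rw [hc2, PySem.List.pyGetD_natCast]
    rw [pvPrefixChar shifts hne (shifts.length - 1 - i) (by omega)]
    have hidx : shifts.length - 1 - (shifts.length - 1 - i) = i := by omega
    rw [hidx]
  · simp [hin]


-- ===== VERDICT (by name: the statement is the Claim_ definition above) =====
theorem two_pass_spec : Claim_equal_two_pass := by
  intro S shifts _ hpre
  unfold Spec_two_pass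
  rw [pvA_eq S shifts hpre.1 hpre.2, pvB_eq S shifts hpre.2]

theorem two_pass_raises : Claim_raises_two_pass := by
  unfold Claim_raises_two_pass
  exact ⟨fun S shifts _ hr hp => hp.1 hr, ⟨by decide, by decide, by decide⟩⟩

-- witness self-check: B's value at the raise witness, read off the raises claim
theorem pvRaiseWitnessOut_ok :
    two_pass_alt pvRaiseWitness_two_pass.1 pvRaiseWitness_two_pass.2 = pvRaiseWitnessOut_two_pass :=
  two_pass_raises.2.2.2
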